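-- pv_equiv track=rewrite | github.com/Florian-DAUVERGNE/inference-alpha-kb | AnalyseurSyntaxique.py | convertir_mots_en_symboles
-- ===== SOURCE A (Python) =====
-- def convertir_mots_en_symboles(expression):
--     """
--     Convertit les mots-clés en symboles logiques.
--     """
--     # Dictionnaire des mots-clés en symboles
--     mots_en_symboles = {
--         "~": "¬",
--         "&": "∧",
--         "|": "∨",
--         ">>": "→",
--         "=": "↔"
--     }
--     # Expression non convertie
--     expression_convertie = expression
--
--     # Convertir tous les mots en symboles
--     for mots, symboles in mots_en_symboles.items():
--         expression_convertie = expression_convertie.replace(mots, symboles)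
--
--     # Retourner l'expression convertie
--     return expression_convertie
-- ===== SOURCE B (Python) =====
-- def convertir_mots_en_symboles(expression):
--     """
--     Convertit les mots-cles en symboles logiques.
--     Single left-to-right scan instead of five sequential str.replace passes.
--     """
--     out = []
--     i = 0
--     n = len(expression)
--     while i < n:
--         c = expression[i]
--         if c == ">" and i + 1 < n and expression[i + 1] == ">":
--             out.append("\u2192")
--             i += 2
--         else:
--             if c == "~":
--                 out.append("\u00ac")
--             elif c == "&":
--                 out.append("\u2227")
--             elif c == "|":
--                 out.append("\u2228")
--             elif c == "=":
--                 out.append("\u2194")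
--             else:
--                 out.append(c)
--             i += 1
--     return "".join(out)
-- ===== Notes on version B (the rewrite author's own statement) =====
-- stated objective: alternative
-- what changed: Replaced the five sequential full-string str.replace passes by a single left-to-right scan that greedily consumes the two-character arrow keyword and maps the four single-character keywords in one pass.
import Mathlib
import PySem

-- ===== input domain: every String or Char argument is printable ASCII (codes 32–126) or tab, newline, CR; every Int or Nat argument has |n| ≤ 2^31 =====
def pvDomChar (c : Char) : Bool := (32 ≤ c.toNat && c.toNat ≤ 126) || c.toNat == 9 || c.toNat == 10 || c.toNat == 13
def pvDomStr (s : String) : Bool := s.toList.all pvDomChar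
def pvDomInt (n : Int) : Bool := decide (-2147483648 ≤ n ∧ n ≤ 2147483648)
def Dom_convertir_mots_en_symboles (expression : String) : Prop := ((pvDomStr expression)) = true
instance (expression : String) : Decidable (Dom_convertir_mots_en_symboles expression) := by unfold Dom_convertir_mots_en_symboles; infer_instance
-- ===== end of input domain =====

-- B replaces A's five sequential str.replace passes by one left-to-right scan (alternative decomposition, same result).

-- ===== PORT A =====
def convertir_mots_en_symboles (expression : String) : String :=
  -- mots_en_symboles = {...}
  let mots_en_symboles : PySem.Dict String String :=
    PySem.Dict.ofList [("~", "¬"), ("&", "∧"), ("|", "∨"), (">>", "→"), ("=", "↔")]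
  -- for mots, symboles in mots_en_symboles.items(): expression_convertie = expression_convertie.replace(mots, symboles)
  mots_en_symboles.items.foldl
    (fun expression_convertie p => PySem.Str.replace expression_convertie p.1 p.2)
    expression

-- ===== PORT B =====
-- the while-loop of Source B: at each position, greedy ">>" first, else the elif chain, else copy
def pvScan : List Char → List Char
  | [] => []
  | c :: t =>
    if c = '>' ∧ t.head? = some '>' then
      '→' :: pvScan t.tail
    else
      (if c = '~' then '¬'
       else if c = '&' then '∧'
       else if c = '|' then '∨'
       else if c = '=' then '↔'
       else c) :: pvScan t
termination_by l => l.length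
decreasing_by
  all_goals simp only [List.length_tail, List.length_cons]
  all_goals omega

def convertir_mots_en_symboles_alt (expression : String) : String :=
  String.ofList (pvScan expression.toList)

-- ===== PRECONDITION & SPEC =====
def Spec_convertir_mots_en_symboles (expression : String) (out : String) : Prop := out = convertir_mots_en_symboles_alt expression
instance (expression : String) (out : String) : Decidable (Spec_convertir_mots_en_symboles expression out) := by unfold Spec_convertir_mots_en_symboles; infer_instance

-- ===== CLAIM (what is proved, stated in full; the proofs are below) =====
def Claim_equal_convertir_mots_en_symboles : Prop := ∀ (expression : String), Dom_convertir_mots_en_symboles expression → Spec_convertir_mots_en_symboles expression (convertir_mots_en_symboles expression)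

-- ===== LEMMAS AND PROOFS =====

-- the single-character replacement maps of A, fused
def pvMap1 (c : Char) : Char :=
  if c = '~' then '¬' else if c = '&' then '∧' else if c = '|' then '∨' else c

def pvMapEq (c : Char) : Char := if c = '=' then '↔' else c

-- structural form of Chars.replace with old = ">>"
def pvRep2 : List Char → List Char
  | [] => []
  | c :: t =>
    if c = '>' ∧ t.head? = some '>' then '→' :: pvRep2 t.tail
    else c :: pvRep2 t
termination_by l => l.length
decreasing_by
  all_goals simp only [List.length_tail, List.length_cons]
  all_goals omega

-- unfolding equations for PySem.Chars.replace.go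
theorem pvGo_cons (old new : List Char) (fuel : Nat) (c : Char) (t acc : List Char) :
    PySem.Chars.replace.go old new (fuel + 1) (c :: t) acc
      = if old.isPrefixOf (c :: t) then
          PySem.Chars.replace.go old new fuel (List.drop old.length (c :: t)) (new.reverse ++ acc)
        else
          PySem.Chars.replace.go old new fuel t (c :: acc) := by
  rw [PySem.Chars.replace.go]

-- go with a single-char pattern, enough fuel, computes acc.reverse ++ map
theorem pvGo_single (a b : Char) :
    ∀ (fuel : Nat) (l acc : List Char), l.length ≤ fuel →
      PySem.Chars.replace.go [a] [b] fuel l acc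
        = acc.reverse ++ l.map (fun c => if c = a then b else c) := by
  intro fuel
  induction fuel with
  | zero =>
    intro l acc h
    have : l = [] := List.eq_nil_of_length_eq_zero (Nat.le_zero.mp h)
    subst this; simp [PySem.Chars.replace.go]
  | succ n ih =>
    intro l acc h
    cases l with
    | nil => simp [PySem.Chars.replace.go]
    | cons c t =>
      rw [pvGo_cons]
      by_cases hc : c = a
      · subst hc
        rw [if_pos (by simp [List.isPrefixOf])]
        simp only [List.length_cons, List.length_nil, List.drop_succ_cons, List.drop_zero]
        rw [ih t _ (by simpa using h)]
        simp
      · rw [if_neg (by simp [List.isPrefixOf]; exact fun hh => (hc hh.symm).elim)]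
        rw [ih t _ (by simpa using h)]
        simp [hc]

theorem pvReplace_single (l : List Char) (a b : Char) :
    PySem.Chars.replace l [a] [b] = l.map (fun c => if c = a then b else c) := by
  rw [show PySem.Chars.replace l [a] [b] = PySem.Chars.replace.go [a] [b] l.length l [] by
    simp [PySem.Chars.replace]]
  simpa using pvGo_single a b l.length l [] le_rfl

-- go with the ">>" pattern computes acc.reverse ++ pvRep2
theorem pvGo_arrow :
    ∀ (fuel : Nat) (l acc : List Char), l.length ≤ fuel →
      PySem.Chars.replace.go ['>', '>'] ['→'] fuel l acc = acc.reverse ++ pvRep2 l := by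
  intro fuel
  induction fuel with
  | zero =>
    intro l acc h
    have : l = [] := List.eq_nil_of_length_eq_zero (Nat.le_zero.mp h)
    subst this; simp [PySem.Chars.replace.go, pvRep2]
  | succ n ih =>
    intro l acc h
    cases l with
    | nil => simp [PySem.Chars.replace.go, pvRep2]
    | cons c t =>
      rw [pvGo_cons]
      by_cases hpre : c = '>' ∧ t.head? = some '>'
      · obtain ⟨hc, ht⟩ := hpre
        cases t with
        | nil => simp at ht
        | cons d t' =>
          have hd : d = '>' := by simpa using ht
          subst hc; subst hd
          rw [if_pos (by simp [List.isPrefixOf])]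
          simp only [List.length_cons, List.length_nil, List.drop_succ_cons, List.drop_zero]
          rw [ih t' _ (by simp at h ⊢; omega)]
          rw [show pvRep2 ('>' :: '>' :: t') = '→' :: pvRep2 t' by
            rw [pvRep2]; simp]
          simp
      · have hnp : ¬ ((['>', '>'] : List Char).isPrefixOf (c :: t) = true) := by
          intro hp
          cases t with
          | nil => simp [List.isPrefixOf] at hp
          | cons d t' =>
            simp only [List.isPrefixOf, Bool.and_true,
              Bool.and_eq_true, beq_iff_eq] at hp
            exact hpre ⟨hp.1.symm, by simp [hp.2.symm]⟩
        rw [if_neg hnp]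
        rw [ih t _ (by simpa using h)]
        rw [show pvRep2 (c :: t) = c :: pvRep2 t by
          rw [pvRep2]; simp [hpre]]
        simp

theorem pvReplace_arrow (l : List Char) :
    PySem.Chars.replace l ['>', '>'] ['→'] = pvRep2 l := by
  rw [show PySem.Chars.replace l ['>', '>'] ['→'] = PySem.Chars.replace.go ['>', '>'] ['→'] l.length l [] by
    simp [PySem.Chars.replace]]
  simpa using pvGo_arrow l.length l [] le_rfl

-- pvMap1 preserves '>'-ness and fixes '→'
theorem pvMap1_gt (c : Char) : pvMap1 c = '>' ↔ c = '>' := by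
  unfold pvMap1; split_ifs with h1 h2 h3 <;> simp_all

-- main: B's scan equals A's fused pipeline
theorem pvScan_eq (l : List Char) :
    (pvRep2 (l.map pvMap1)).map pvMapEq = pvScan l := by
  induction hl : l.length using Nat.strong_induction_on generalizing l with
  | _ n ih =>
  cases l with
  | nil => simp [pvRep2, pvScan]
  | cons c t =>
    by_cases hcase : c = '>' ∧ t.head? = some '>'
    · obtain ⟨hc, ht⟩ := hcase
      cases t with
      | nil => simp at ht
      | cons d t' =>
        have hd : d = '>' := by simpa using ht
        subst hc; subst hd
        have m1 : pvMap1 '>' = '>' := by decide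
        rw [show pvScan ('>' :: '>' :: t') = '→' :: pvScan t' by
          rw [pvScan]; simp]
        simp only [List.map_cons, m1]
        rw [show pvRep2 ('>' :: '>' :: List.map pvMap1 t') = '→' :: pvRep2 (List.map pvMap1 t') by
          rw [pvRep2]; simp]
        simp only [List.map_cons]
        rw [ih t'.length (by simp [← hl]) t' rfl]
        rfl
    · rw [show pvScan (c :: t)
          = (if c = '~' then '¬' else if c = '&' then '∧' else if c = '|' then '∨'
             else if c = '=' then '↔' else c) :: pvScan t by
        rw [pvScan]; simp [hcase]]
      have hnp : ¬ (pvMap1 c = '>' ∧ (t.map pvMap1).head? = some '>') := by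
        rintro ⟨h1, h2⟩
        apply hcase
        refine ⟨(pvMap1_gt c).mp h1, ?_⟩
        cases t with
        | nil => simp at h2
        | cons d t' =>
          simp only [List.map_cons, List.head?_cons, Option.some_inj] at h2
          simp [List.head?_cons, (pvMap1_gt d).mp h2]
      simp only [List.map_cons]
      rw [show pvRep2 (pvMap1 c :: List.map pvMap1 t) = pvMap1 c :: pvRep2 (List.map pvMap1 t) by
        rw [pvRep2, if_neg hnp]]
      simp only [List.map_cons]
      rw [ih t.length (by simp [← hl]) t rfl]
      congr 1
      unfold pvMap1 pvMapEq
      split_ifs <;> simp_all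

-- ===== VERDICT (by name: the statement is the Claim_ definition above) =====
theorem convertir_mots_en_symboles_spec : Claim_equal_convertir_mots_en_symboles := by
  intro expression _
  unfold Spec_convertir_mots_en_symboles
  have hA : convertir_mots_en_symboles expression
      = PySem.Str.replace (PySem.Str.replace (PySem.Str.replace (PySem.Str.replace
          (PySem.Str.replace expression "~" "¬") "&" "∧") "|" "∨") ">>" "→") "=" "↔" := rfl
  rw [hA]
  unfold convertir_mots_en_symboles_alt
  rw [← pvScan_eq expression.toList]
  simp only [PySem.Str.replace, String.toList_ofList]
  congr 1
  rw [show ("~" : String).toList = ['~'] from rfl, show ("¬" : String).toList = ['¬'] from rfl,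
    show ("&" : String).toList = ['&'] from rfl, show ("∧" : String).toList = ['∧'] from rfl,
    show ("|" : String).toList = ['|'] from rfl, show ("∨" : String).toList = ['∨'] from rfl,
    show (">>" : String).toList = ['>', '>'] from rfl, show ("→" : String).toList = ['→'] from rfl,
    show ("=" : String).toList = ['='] from rfl, show ("↔" : String).toList = ['↔'] from rfl]
  rw [pvReplace_single, pvReplace_single, pvReplace_single, pvReplace_arrow, pvReplace_single]
  rw [show (fun c => if c = '=' then '↔' else c) = pvMapEq from rfl]
  congr 2
  rw [List.map_map, List.map_map]
  refine List.map_congr_left ?_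
  intro c _
  simp only [Function.comp, pvMap1]
  split_ifs <;> simp_all
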